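-- pv_equiv track=rewrite | github.com/robertatakenaka/core | core/utils/standardizer.py | standardize_code_and_name
-- ===== SOURCE A (Python) =====
-- ITEMS_SEP_FOR_LOCATION = [";", ", ", "|", "/"]
--
-- PARTS_SEP_FOR_LOCATION = [" - ", "- ", " -", ", ", "(", "/"]
--
-- def remove_extra_spaces(text):
--     text = text and text.strip()
--     if not text:
--         return text
--     # padroniza a quantidade de espaços
--     return " ".join([item.strip() for item in text.split() if item.strip()])
--
-- def standardize_code_and_name(original):
--     """
--     Dado o texto original, identifica pares de code e nome.
--     Os separadores podem separar code e nome e/ou itens de lista.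
--     Ex.: USP / Unicamp
--     São Paulo/SP, Rio de Janeiro/RJ
--     """
--     text_ = original
--     text_ = text_ and text_.strip()
--     if not text_:
--         return []
--
--     text_ = remove_extra_spaces(text_)
--     if not text_:
--         yield {"name": None}
--         return
--
--     items_separators = ITEMS_SEP_FOR_LOCATION
--     parts_separators = PARTS_SEP_FOR_LOCATION
--
--     PARTBR = "~PARTBR~"
--     LINEBR = "~LINEBR~"
--     for sep in items_separators:
--         text_ = text_.replace(sep, PARTBR)
--     for sep in parts_separators:
--         text_ = text_.replace(sep, PARTBR)
--
--     codes = []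
--     names = []
--     for item in text_.split(PARTBR):
--         item = item.strip()
--         if not item:
--             continue
--         if len(item) == 2:
--             codes.append(item)
--         else:
--             names.append(item)
--
--     if len(names) == len(codes):
--         for acron, name in zip(codes, names):
--             yield {"code": acron, "name": name}
--     elif len(names) == 0:
--         for acron in codes:
--             yield {"code": acron}
--     elif len(codes) == 0:
--         for name in names:
--             yield {"name": name}
--     else:
--         # como o texto está bem fora do padrão,
--         # pode-se evidenciar retornando o original
--         yield {"name": original}
-- ===== SOURCE B (Python) =====
-- ITEMS_SEP_FOR_LOCATION = [";", ", ", "|", "/"]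
--
-- PARTS_SEP_FOR_LOCATION = [" - ", "- ", " -", ", ", "(", "/"]
--
-- def remove_extra_spaces(text):
--     text = text and text.strip()
--     if not text:
--         return text
--     # padroniza a quantidade de espaços
--     return " ".join([item.strip() for item in text.split() if item.strip()])
--
-- def standardize_code_and_name(original):
--     # B: split the text hierarchically (one split pass per separator, no
--     # sentinel marker string), then strip/classify the resulting tokens.
--     text_ = original and original.strip()
--     if not text_:
--         return []
--
--     text_ = remove_extra_spaces(text_)
--
--     parts = [text_]
--     for sep in ITEMS_SEP_FOR_LOCATION + PARTS_SEP_FOR_LOCATION: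
--         parts = [piece for part in parts for piece in part.split(sep)]
--
--     tokens = [t for t in (part.strip() for part in parts) if t]
--     codes = [t for t in tokens if len(t) == 2]
--     names = [t for t in tokens if len(t) != 2]
--
--     if len(names) == len(codes):
--         for code, name in zip(codes, names):
--             yield {"code": code, "name": name}
--     elif len(names) == 0:
--         for code in codes:
--             yield {"code": code}
--     elif len(codes) == 0:
--         for name in names:
--             yield {"name": name}
--     else:
--         yield {"name": original}
-- ===== Notes on version B (the rewrite author's own statement) =====
-- stated objective: alternative
-- what changed: A rewrites every separator occurrence to the sentinel string "~PARTBR~" in two replace loops and then splits once on the sentinel; B keeps a list of parts and splits it hierarchically, one split pass per separator, so the sentinel marker (and its possible collision with the text) disappears.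
-- outside the precondition, e.g. on standardize_code_and_name('~PARTBR;x'): A returns [{'name': 'PARTBR~x'}], B returns [{'name': '~PARTBR'}, {'name': 'x'}]; on standardize_code_and_name('~PARTBR~'): A returns [], B returns [{'name': '~PARTBR~'}]; on standardize_code_and_name('~PARTBR'): A returns [{'name': '~PARTBR'}], B returns [{'name': '~PARTBR'}]
import Mathlib
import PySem

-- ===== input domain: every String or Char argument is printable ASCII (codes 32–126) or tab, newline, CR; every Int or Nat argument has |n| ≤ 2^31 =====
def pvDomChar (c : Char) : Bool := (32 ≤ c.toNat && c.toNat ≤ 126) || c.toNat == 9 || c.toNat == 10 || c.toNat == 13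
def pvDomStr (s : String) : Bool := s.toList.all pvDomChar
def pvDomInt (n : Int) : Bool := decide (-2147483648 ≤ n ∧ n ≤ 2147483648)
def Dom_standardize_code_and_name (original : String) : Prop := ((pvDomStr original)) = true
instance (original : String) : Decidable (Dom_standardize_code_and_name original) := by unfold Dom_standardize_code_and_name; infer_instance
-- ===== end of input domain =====

-- B replaces A's replace-all-separators-with-a-sentinel-then-split-once pipeline by
-- hierarchical splitting (one split pass per separator, no sentinel string); objective:
-- alternative structure, same cost.

-- ===== PORT A =====
def ITEMS_SEP_FOR_LOCATION : List String := [";", ", ", "|", "/"]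

def PARTS_SEP_FOR_LOCATION : List String := [" - ", "- ", " -", ", ", "(", "/"]

def remove_extra_spaces (text : String) : String :=
  -- 'text = text and text.strip()' on str: "" stays "", otherwise strip
  let text := if text = "" then text else PySem.Str.strip text
  if text = "" then text
  else
    PySem.Str.join " "
      (((PySem.Str.split₀ text).filter (fun item => PySem.Str.strip item ≠ ""))
        |>.map (fun item => PySem.Str.strip item))

def standardize_code_and_name (original : String) : List (List (String × Option String)) :=
  let text1 := if original = "" then original else PySem.Str.strip original
  if text1 = "" then []
  else
    let text2 := remove_extra_spaces text1
    if text2 = "" then [[("name", none)]]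
    else
      -- two replace loops (items then parts separators), sentinel "~PARTBR~"
      let t3 := ITEMS_SEP_FOR_LOCATION.foldl (fun t sep => PySem.Str.replace t sep "~PARTBR~") text2
      let t4 := PARTS_SEP_FOR_LOCATION.foldl (fun t sep => PySem.Str.replace t sep "~PARTBR~") t3
      -- text_.split(PARTBR): separator is the nonempty literal, so split? is `some`; getD [] is exact
      let cn := ((PySem.Str.split? t4 "~PARTBR~").getD []).foldl
          (fun (cn : List String × List String) item =>
            let item := PySem.Str.strip item
            if item = "" then cn
            else if PySem.Str.len item = 2 then (cn.1 ++ [item], cn.2)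
            else (cn.1, cn.2 ++ [item]))
          ([], [])
      let codes := cn.1
      let names := cn.2
      if names.length = codes.length then
        (codes.zip names).map (fun p => [("code", some p.1), ("name", some p.2)])
      else if names.length = 0 then codes.map (fun a => [("code", some a)])
      else if codes.length = 0 then names.map (fun n => [("name", some n)])
      else [[("name", some original)]]

-- ===== PORT B =====
def standardize_code_and_name_alt (original : String) : List (List (String × Option String)) :=
  let text1 := if original = "" then original else PySem.Str.strip original
  if text1 = "" then []
  else
    let text2 := remove_extra_spaces text1
    -- hierarchical splitting: one split pass per separator, no sentinel
    let parts := (ITEMS_SEP_FOR_LOCATION ++ PARTS_SEP_FOR_LOCATION).foldl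
        (fun ps sep => ps.flatMap (fun p => (PySem.Str.split? p sep).getD [])) [text2]
    let tokens := (parts.map PySem.Str.strip).filter (fun t => t ≠ "")
    let codes := tokens.filter (fun t => PySem.Str.len t = 2)
    let names := tokens.filter (fun t => ¬ (PySem.Str.len t = 2))
    if names.length = codes.length then
      (codes.zip names).map (fun p => [("code", some p.1), ("name", some p.2)])
    else if names.length = 0 then codes.map (fun a => [("code", some a)])
    else if codes.length = 0 then names.map (fun n => [("name", some n)])
    else [[("name", some original)]]

-- ===== PRECONDITION & SPEC =====
-- Pre_ excludes inputs containing the substring "~PARTBR", on which A's hard-coded sentinel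
-- marker "~PARTBR~" collides with the text itself and A's token boundaries are an accident
-- of the sentinel implementation.
def Pre_standardize_code_and_name (original : String) : Prop :=
  PySem.Str.isIn "~PARTBR" original = false

instance (original : String) : Decidable (Pre_standardize_code_and_name original) := by
  unfold Pre_standardize_code_and_name; infer_instance

def pvWitness_standardize_code_and_name : String := "USP / Unicamp, Sao Paulo/SP"

def Spec_standardize_code_and_name (original : String) (out : List (List (String × Option String))) : Prop := out = standardize_code_and_name_alt original
instance (original : String) (out : List (List (String × Option String))) : Decidable (Spec_standardize_code_and_name original out) := by unfold Spec_standardize_code_and_name; infer_instance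

-- ===== CLAIM (what is proved, stated in full; the proofs are below) =====
def Claim_equal_standardize_code_and_name : Prop := ∀ (original : String), Dom_standardize_code_and_name original → Pre_standardize_code_and_name original → Spec_standardize_code_and_name original (standardize_code_and_name original)

-- ===== LEMMAS AND PROOFS =====

-- the sentinel "~PARTBR~" and its dangerous prefix "~PARTBR" as character lists
def pvSent : List Char := ['~', 'P', 'A', 'R', 'T', 'B', 'R', '~']
def pvH7 : List Char := ['~', 'P', 'A', 'R', 'T', 'B', 'R']

-- characters a separator may consist of (all ten separators use only these)
def pvSepOK (sep : List Char) : Prop :=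
  sep ≠ [] ∧ ∀ c ∈ sep, c ∈ [';', ',', ' ', '|', '/', '-', '(']

theorem pv_rgo_zero (old new l acc : List Char) :
    PySem.Chars.replace.go old new 0 l acc = acc.reverse ++ l := by
  rw [PySem.Chars.replace.go]

theorem pv_rgo_nil (old new : List Char) (f : Nat) (acc : List Char) :
    PySem.Chars.replace.go old new (f+1) [] acc = acc.reverse := by
  rw [PySem.Chars.replace.go]; omega

theorem pv_rgo_cons (old new : List Char) (f : Nat) (c : Char) (t acc : List Char) :
    PySem.Chars.replace.go old new (f+1) (c :: t) acc =
      if old.isPrefixOf (c :: t) = true then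
        PySem.Chars.replace.go old new f (List.drop old.length (c :: t)) (new.reverse ++ acc)
      else PySem.Chars.replace.go old new f t (c :: acc) := by
  rw [PySem.Chars.replace.go]

theorem pv_sgo_zero (sep l cur : List Char) (acc : List (List Char)) :
    PySem.Chars.splitOn.go sep 0 l cur acc = ((cur.reverse ++ l) :: acc).reverse := by
  rw [PySem.Chars.splitOn.go]

theorem pv_sgo_nil (sep : List Char) (f : Nat) (cur : List Char) (acc : List (List Char)) :
    PySem.Chars.splitOn.go sep (f+1) [] cur acc = (cur.reverse :: acc).reverse := by
  rw [PySem.Chars.splitOn.go]; omega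

theorem pv_sgo_cons (sep : List Char) (f : Nat) (c : Char) (t cur : List Char) (acc : List (List Char)) :
    PySem.Chars.splitOn.go sep (f+1) (c :: t) cur acc =
      if sep.isPrefixOf (c :: t) = true then
        PySem.Chars.splitOn.go sep f (List.drop sep.length (c :: t)) [] (cur.reverse :: acc)
      else PySem.Chars.splitOn.go sep f t (c :: cur) acc := by
  rw [PySem.Chars.splitOn.go]

theorem pv_rgo_acc (old new : List Char) (f : Nat) (l acc : List Char) :
    PySem.Chars.replace.go old new f l acc = acc.reverse ++ PySem.Chars.replace.go old new f l [] := by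
  induction f generalizing l acc with
  | zero => simp [pv_rgo_zero]
  | succ f ih =>
    cases l with
    | nil => simp [pv_rgo_nil]
    | cons c t =>
      rw [pv_rgo_cons, pv_rgo_cons]
      split_ifs with h
      · rw [ih _ (new.reverse ++ acc), ih _ (new.reverse ++ [])]; simp
      · rw [ih _ (c :: acc), ih _ [c]]; simp

theorem pv_sgo_ne_nil (sep : List Char) (f : Nat) (l cur : List Char) (acc : List (List Char)) :
    PySem.Chars.splitOn.go sep f l cur acc ≠ [] := by
  induction f generalizing l cur acc with
  | zero => simp [pv_sgo_zero]
  | succ f ih =>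
    cases l with
    | nil => simp [pv_sgo_nil]
    | cons c t =>
      rw [pv_sgo_cons]; split_ifs with h
      · exact ih _ _ _
      · exact ih _ _ _

theorem pv_rgo_fuel (old new : List Char) (hold : old ≠ []) (f f' : Nat) (l acc : List Char)
    (h : l.length ≤ f) (h' : l.length ≤ f') :
    PySem.Chars.replace.go old new f l acc = PySem.Chars.replace.go old new f' l acc := by
  induction f generalizing l acc f' with
  | zero =>
    have : l = [] := by cases l <;> simp_all
    subst this
    cases f' with
    | zero => rfl
    | succ f' => rw [pv_rgo_zero, pv_rgo_nil]; simp
  | succ f ih =>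
    cases l with
    | nil =>
      cases f' with
      | zero => rw [pv_rgo_zero, pv_rgo_nil]; simp
      | succ f' => rw [pv_rgo_nil, pv_rgo_nil]
    | cons c t =>
      cases f' with
      | zero => simp at h'
      | succ f' =>
        rw [pv_rgo_cons, pv_rgo_cons]
        have hol : 1 ≤ old.length := by cases old <;> simp_all
        split_ifs with hp
        · exact ih _ _ _ (by simp at h ⊢; omega) (by simp at h' ⊢; omega)
        · exact ih _ _ _ (by simp at h ⊢; omega) (by simp at h' ⊢; omega)

theorem pv_intercalate_cons (X x : List Char) (bs : List (List Char)) (hb : bs ≠ []) :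
    X.intercalate (x :: bs) = x ++ X ++ X.intercalate bs := by
  obtain ⟨y, t, rfl⟩ := List.exists_cons_of_ne_nil hb
  simp [List.intercalate, List.intersperse]

theorem pv_intercalate_append (X : List Char) (as bs : List (List Char)) (ha : as ≠ []) (hb : bs ≠ []) :
    X.intercalate (as ++ bs) = X.intercalate as ++ X ++ X.intercalate bs := by
  induction as with
  | nil => simp at ha
  | cons x as ih =>
    cases as with
    | nil =>
      obtain ⟨y, t, rfl⟩ := List.exists_cons_of_ne_nil hb
      simp [List.intercalate, List.intersperse]
    | cons y t =>
      rw [List.cons_append, pv_intercalate_cons X x ((y :: t) ++ bs) (by simp),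
        pv_intercalate_cons X x (y :: t) (by simp), ih (by simp)]
      simp

theorem pv_scan_r (sep new : List Char) (u b acc : List Char) (f : Nat)
    (hno : ∀ i < u.length, sep.isPrefixOf (u.drop i ++ b) = false)
    (hf : u.length + b.length ≤ f) :
    PySem.Chars.replace.go sep new f (u ++ b) acc
      = PySem.Chars.replace.go sep new (f - u.length) b (u.reverse ++ acc) := by
  induction u generalizing f acc with
  | nil => simp
  | cons c t ih =>
    cases f with
    | zero => simp at hf
    | succ f =>
      rw [List.cons_append, pv_rgo_cons]
      have h0 := hno 0 (by simp)
      simp only [List.drop_zero, List.cons_append] at h0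
      rw [if_neg (by simp [h0])]
      rw [ih _ _ (fun i hi => by simpa using hno (i+1) (by simpa using hi)) (by simp at hf ⊢; omega)]
      simp only [List.length_cons, List.reverse_cons]
      congr 1
      · omega
      · simp

theorem pv_scan_s (sep : List Char) (u b cur : List Char) (acc : List (List Char)) (f : Nat)
    (hno : ∀ i < u.length, sep.isPrefixOf (u.drop i ++ b) = false)
    (hf : u.length + b.length ≤ f) :
    PySem.Chars.splitOn.go sep f (u ++ b) cur acc
      = PySem.Chars.splitOn.go sep (f - u.length) b (u.reverse ++ cur) acc := by
  induction u generalizing f cur with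
  | nil => simp
  | cons c t ih =>
    cases f with
    | zero => simp at hf
    | succ f =>
      rw [List.cons_append, pv_sgo_cons]
      have h0 := hno 0 (by simp)
      simp only [List.drop_zero, List.cons_append] at h0
      rw [if_neg (by simp [h0])]
      rw [ih _ _ (fun i hi => by simpa using hno (i+1) (by simpa using hi)) (by simp at hf ⊢; omega)]
      simp only [List.length_cons, List.reverse_cons]
      congr 1
      · omega
      · simp

theorem pv_ic_snoc (new x : List Char) (as : List (List Char)) :
    new.intercalate (as ++ [x]) = new.intercalate as ++ (if as = [] then [] else new) ++ x := by
  cases as with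
  | nil => simp [List.intercalate]
  | cons a s =>
    rw [pv_intercalate_append new (a :: s) [x] (by simp) (by simp), if_neg (by simp)]
    simp [List.intercalate]

theorem pv_join_sgo (old new : List Char) (hold : old ≠ []) (f : Nat) (l cur : List Char)
    (accS : List (List Char)) (h : l.length ≤ f) :
    new.intercalate (PySem.Chars.splitOn.go old f l cur accS)
      = new.intercalate accS.reverse ++ (if accS = [] then [] else new) ++ cur.reverse
          ++ PySem.Chars.replace.go old new f l [] := by
  have hol : 1 ≤ old.length := by cases old <;> simp_all
  induction f generalizing l cur accS with
  | zero =>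
    have : l = [] := by cases l <;> simp_all
    subst this
    rw [pv_sgo_zero, pv_rgo_zero]
    simp only [List.append_nil, List.reverse_cons, pv_ic_snoc, List.reverse_nil]
    by_cases hA : accS = [] <;> simp [hA]
  | succ f ih =>
    cases l with
    | nil =>
      rw [pv_sgo_nil, pv_rgo_nil]
      simp only [List.reverse_cons, pv_ic_snoc, List.reverse_nil]
      by_cases hA : accS = [] <;> simp [hA]
    | cons c t =>
      rw [pv_sgo_cons, pv_rgo_cons]
      by_cases hp : old.isPrefixOf (c :: t) = true
      · rw [if_pos hp, if_pos hp,
          ih (List.drop old.length (c :: t)) [] (cur.reverse :: accS) (by simp at h ⊢; omega),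
          pv_rgo_acc old new f (List.drop old.length (c :: t)) (new.reverse ++ [])]
        rw [if_neg (by simp)]
        simp only [List.reverse_cons, pv_ic_snoc, List.append_nil, List.reverse_reverse,
          List.reverse_nil, List.reverse_eq_nil_iff]
        by_cases hA : accS = [] <;> simp [hA, List.append_assoc]
      · rw [if_neg hp, if_neg hp, ih t (c :: cur) accS (by simp at h ⊢; omega),
          pv_rgo_acc old new f t (c :: [])]
        simp [List.append_assoc]

theorem pv_replace_eq_join_split (s old new : List Char) (hold : old ≠ []) :
    PySem.Chars.replace s old new = PySem.Chars.join new (PySem.Chars.splitOn s old) := by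
  rw [PySem.Chars.replace, if_neg (by simp [hold]), PySem.Chars.splitOn, PySem.Chars.join]
  rw [pv_join_sgo old new hold (s.length + 1) s [] [] (by omega)]
  simp [List.intercalate,
    pv_rgo_fuel old new hold (s.length + 1) s.length s [] (by omega) (by omega)]

-- period analysis of the sentinel, instantiated per k below
theorem pv_sent_period (k : Nat) (h0 : 0 < k) (h8 : k < 8)
    (h : pvSent.drop k = pvSent.take (8 - k)) : k = 7 := by
  interval_cases k <;> simp_all [pvSent]

theorem pv_nomatch_clean (p b : List Char) (hp : ¬ pvH7 <:+: p) :
    ∀ i < p.length, pvSent.isPrefixOf (p.drop i ++ (pvSent ++ b)) = false := by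
  intro i hi
  by_contra hcon
  have hpre : pvSent <+: (p.drop i ++ (pvSent ++ b)) := by
    rw [← List.isPrefixOf_iff_prefix]
    cases hx : pvSent.isPrefixOf (p.drop i ++ (pvSent ++ b)) <;> simp_all
  set a := p.drop i with ha
  have hak : a.length = p.length - i := by simp [ha]
  have hasuf : a <:+ p := List.drop_suffix i p
  have htake := List.prefix_iff_eq_take.mp hpre
  by_cases hk : 8 ≤ a.length
  · -- sentinel inside a: then pvH7 infix of p
    have h8 : pvSent.length = 8 := by simp [pvSent]
    have : pvSent = a.take 8 := by
      rw [htake, h8, List.take_append_of_le_length hk]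
    have hsa : pvSent <+: a := this ▸ List.take_prefix 8 a
    have h7 : pvH7 <+: pvSent := by simp [pvH7, pvSent, List.cons_prefix_cons]
    exact hp ((h7.trans hsa).isInfix.trans hasuf.isInfix)
  · rw [Nat.not_le] at hk
    have hkpos : 0 < a.length := by simp [ha]; omega
    have h8 : pvSent.length = 8 := by simp [pvSent]
    have hsplit : pvSent = a ++ pvSent.take (8 - a.length) := by
      have h1 := htake
      rw [h8, show (8 : Nat) = a.length + (8 - a.length) by omega,
        List.take_length_add_append,
        List.take_append_of_le_length (by simp [pvSent])] at h1
      exact h1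
    have hdrop : pvSent.drop a.length = pvSent.take (8 - a.length) := by
      conv_lhs => rw [hsplit]
      simp
    have := pv_sent_period a.length hkpos hk hdrop
    have ha7 : a = pvH7 := by
      have : a = pvSent.take a.length := by
        conv_rhs => rw [hsplit]
        simp
      rw [this, ‹a.length = 7›]; rfl
    exact hp (ha7 ▸ hasuf).isInfix

theorem pv_nomatch_clean_nil (p : List Char) (hp : ¬ pvH7 <:+: p) :
    ∀ i < p.length, pvSent.isPrefixOf (p.drop i) = false := by
  intro i hi
  by_contra hcon
  have hpre : pvSent <+: p.drop i := by
    rw [← List.isPrefixOf_iff_prefix]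
    cases hx : pvSent.isPrefixOf (p.drop i) <;> simp_all
  have h7 : pvH7 <+: pvSent := by simp [pvH7, pvSent, List.cons_prefix_cons]
  exact hp ((h7.trans hpre).isInfix.trans (List.drop_suffix i p).isInfix)

theorem pv_nomatch_sep (sep : List Char) (hs : pvSepOK sep) (b : List Char) :
    ∀ i < pvSent.length, sep.isPrefixOf (pvSent.drop i ++ b) = false := by
  intro i hi
  obtain ⟨c, cs, rfl⟩ := List.exists_cons_of_ne_nil hs.1
  by_contra hcon
  have hpre : (c :: cs) <+: (pvSent.drop i ++ b) := by
    rw [← List.isPrefixOf_iff_prefix]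
    cases hx : (c :: cs).isPrefixOf (pvSent.drop i ++ b) <;> simp_all
  rw [List.drop_eq_getElem_cons hi] at hpre
  have hc : c = pvSent[i] := by
    rw [List.cons_append] at hpre
    simp [List.cons_prefix_cons] at hpre
    exact hpre.1
  have hmem : c ∈ pvSent := hc ▸ List.getElem_mem hi
  have hsep : c ∈ [';', ',', ' ', '|', '/', '-', '('] := hs.2 c (by simp)
  revert hmem
  fin_cases hsep <;> simp [pvSent]

theorem pv_no_span (sep : List Char) (hs : pvSepOK sep) (a b : List Char)
    (h : sep.isPrefixOf (a ++ (pvSent ++ b)) = true) : sep.isPrefixOf a = true := by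
  have hpre : sep <+: (a ++ (pvSent ++ b)) := List.isPrefixOf_iff_prefix.mp h
  have htake := List.prefix_iff_eq_take.mp hpre
  by_cases hk : sep.length ≤ a.length
  · rw [List.take_append_of_le_length hk] at htake
    exact List.isPrefixOf_iff_prefix.mpr (htake ▸ List.take_prefix sep.length a)
  · exfalso
    rw [Nat.not_le] at hk
    have h1 := htake
    rw [show sep.length = a.length + (sep.length - a.length) by omega,
      List.take_length_add_append] at h1
    have htld : '~' ∈ sep := by
      rw [h1]
      have hone : (pvSent ++ b).take (sep.length - a.length)
          = '~' :: ((['P','A','R','T','B','R','~'] ++ b).take (sep.length - a.length - 1)) := by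
        show (('~' :: (['P','A','R','T','B','R','~'] ++ b)) ).take _ = _
        rw [show sep.length - a.length = (sep.length - a.length - 1) + 1 by omega,
          List.take_succ_cons]
        simp
      rw [hone]
      simp
    have := hs.2 '~' htld
    simp at this


-- (remaining lemmas)
theorem pv_splitOn_ne_nil (s sep : List Char) : PySem.Chars.splitOn s sep ≠ [] :=
  pv_sgo_ne_nil _ _ _ _ _

theorem pv_replace_nil (sep new : List Char) (hsep : sep ≠ []) :
    PySem.Chars.replace [] sep new = [] := by
  rw [PySem.Chars.replace, if_neg (by simp [hsep])]
  exact pv_rgo_zero _ _ _ _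

-- one unfolding step of replace at a separator match
theorem pv_replace_step_match (a sep new : List Char) (hsep : sep ≠ []) (ha : a ≠ [])
    (h : sep.isPrefixOf a = true) :
    PySem.Chars.replace a sep new = new ++ PySem.Chars.replace (a.drop sep.length) sep new := by
  obtain ⟨c, t, rfl⟩ := List.exists_cons_of_ne_nil ha
  have hol : 1 ≤ sep.length := by cases sep <;> simp_all
  rw [PySem.Chars.replace, if_neg (by simp [hsep]), PySem.Chars.replace, if_neg (by simp [hsep])]
  simp only [List.length_cons]
  rw [pv_rgo_cons, if_pos h, pv_rgo_acc,
    pv_rgo_fuel sep new hsep t.length (List.drop sep.length (c :: t)).length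
      (List.drop sep.length (c :: t)) [] (by simp; omega) (le_refl _)]
  simp

theorem pv_replace_step_nomatch (sep new : List Char) (hsep : sep ≠ []) (c : Char) (t : List Char)
    (h : sep.isPrefixOf (c :: t) = false) :
    PySem.Chars.replace (c :: t) sep new = c :: PySem.Chars.replace t sep new := by
  rw [PySem.Chars.replace, if_neg (by simp [hsep]), PySem.Chars.replace, if_neg (by simp [hsep])]
  simp only [List.length_cons]
  rw [pv_rgo_cons, if_neg (by simp [h]), pv_rgo_acc]
  simp

theorem pv_replace_distrib (sep : List Char) (hs : pvSepOK sep) (a b : List Char) :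
    PySem.Chars.replace (a ++ (pvSent ++ b)) sep pvSent
      = PySem.Chars.replace a sep pvSent ++ pvSent ++ PySem.Chars.replace b sep pvSent := by
  have hsep := hs.1
  have hol : 1 ≤ sep.length := by cases sep <;> simp_all
  obtain ⟨n, hn⟩ : ∃ n, a.length ≤ n := ⟨a.length, le_refl _⟩
  induction n generalizing a with
  | zero =>
    have : a = [] := by cases a <;> simp_all
    subst this
    rw [pv_replace_nil _ _ hsep]
    simp only [List.nil_append]
    rw [PySem.Chars.replace, if_neg (by simp [hsep])]
    rw [pv_scan_r sep pvSent pvSent b [] _ (pv_nomatch_sep sep hs b) (by simp [pvSent]; omega)]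
    rw [pv_rgo_acc]
    have hb : (pvSent ++ b).length - pvSent.length = b.length := by simp
    rw [hb, pv_rgo_fuel sep pvSent hsep b.length b.length b _ (le_refl _) (le_refl _)]
    rw [PySem.Chars.replace, if_neg (by simp [hsep])]
    simp
  | succ n ih =>
    cases a with
    | nil =>
      rw [pv_replace_nil _ _ hsep]
      simp only [List.nil_append]
      rw [PySem.Chars.replace, if_neg (by simp [hsep])]
      rw [pv_scan_r sep pvSent pvSent b [] _ (pv_nomatch_sep sep hs b) (by simp [pvSent]; omega)]
      rw [pv_rgo_acc]
      have hb : (pvSent ++ b).length - pvSent.length = b.length := by simp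
      rw [hb, pv_rgo_fuel sep pvSent hsep b.length b.length b _ (le_refl _) (le_refl _)]
      rw [PySem.Chars.replace, if_neg (by simp [hsep])]
      simp
    | cons c t =>
      by_cases hp : sep.isPrefixOf ((c :: t) ++ (pvSent ++ b)) = true
      · have hpa : sep.isPrefixOf (c :: t) = true := pv_no_span sep hs _ b hp
        obtain ⟨a₂, ha₂⟩ := List.isPrefixOf_iff_prefix.mp hpa
        rw [pv_replace_step_match _ _ _ hsep (by simp) hp,
          pv_replace_step_match _ _ _ hsep (by simp) hpa]
        have hd1 : ((c :: t) ++ (pvSent ++ b)).drop sep.length = (c :: t).drop sep.length ++ (pvSent ++ b) := by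
          apply List.drop_append_of_le_length
          rw [← ha₂]; simp
        have hd2 : (c :: t).drop sep.length = a₂ := by rw [← ha₂]; simp
        rw [hd1, hd2, ih a₂ (by rw [← ha₂] at hn; simp at hn; omega)]
        simp
      · have hpa : sep.isPrefixOf (c :: t) = false := by
          by_contra hx
          have : sep <+: (c :: t) := List.isPrefixOf_iff_prefix.mp (by cases h : sep.isPrefixOf (c :: t) <;> simp_all)
          exact hp (List.isPrefixOf_iff_prefix.mpr (this.trans (List.prefix_append _ _)))
        have hpf : sep.isPrefixOf (c :: (t ++ (pvSent ++ b))) = false := by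
          rw [← List.cons_append]
          cases hx : sep.isPrefixOf ((c :: t) ++ (pvSent ++ b)) <;> simp_all
        rw [List.cons_append, pv_replace_step_nomatch _ _ hsep _ _ hpf,
          pv_replace_step_nomatch _ _ hsep _ _ hpa,
          ih t (by simp at hn; omega)]
        simp

theorem pv_replace_intercalate (sep : List Char) (hs : pvSepOK sep) (parts : List (List Char))
    (hne : parts ≠ []) :
    PySem.Chars.replace (pvSent.intercalate parts) sep pvSent
      = pvSent.intercalate (parts.flatMap (fun p => PySem.Chars.splitOn p sep)) := by
  induction parts with
  | nil => simp at hne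
  | cons p rest ih =>
    cases rest with
    | nil =>
      have h1 : pvSent.intercalate [p] = p := by simp [List.intercalate]
      have h2 : pvSent.intercalate (List.flatMap (fun p => PySem.Chars.splitOn p sep) [p])
          = pvSent.intercalate (PySem.Chars.splitOn p sep) := by simp
      rw [h1, h2, pv_replace_eq_join_split p sep pvSent hs.1, PySem.Chars.join]
    | cons q rest' =>
      rw [pv_intercalate_cons pvSent p (q :: rest') (by simp)]
      rw [List.append_assoc, pv_replace_distrib sep hs p _]
      rw [ih (by simp)]
      rw [pv_replace_eq_join_split p sep pvSent hs.1, PySem.Chars.join]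
      have h1 : PySem.Chars.splitOn p sep ≠ [] := pv_splitOn_ne_nil p sep
      have h2 : (q :: rest').flatMap (fun p => PySem.Chars.splitOn p sep) ≠ [] := by
        simp only [List.flatMap_cons]
        intro hx
        rcases List.append_eq_nil_iff.mp hx with ⟨h3, _⟩
        exact pv_splitOn_ne_nil q sep h3
      conv_rhs => rw [List.flatMap_cons]
      rw [pv_intercalate_append pvSent _ _ h1 h2]


theorem pv_split_intercalate (parts : List (List Char)) (hne : parts ≠ [])
    (hcl : ∀ p ∈ parts, ¬ pvH7 <:+: p) :
    PySem.Chars.splitOn (pvSent.intercalate parts) pvSent = parts := by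
  have hgo : ∀ (parts : List (List Char)), parts ≠ [] → (∀ p ∈ parts, ¬ pvH7 <:+: p) →
      ∀ (f : Nat) (acc : List (List Char)), (pvSent.intercalate parts).length + 1 ≤ f →
      PySem.Chars.splitOn.go pvSent f (pvSent.intercalate parts) [] acc = acc.reverse ++ parts := by
    intro parts
    induction parts with
    | nil => intro h; simp at h
    | cons p rest ih =>
      intro _ hcl f acc hf
      cases rest with
      | nil =>
        have hic : pvSent.intercalate [p] = p := by simp [List.intercalate]
        rw [hic] at hf ⊢
        have hno : ∀ i < p.length, pvSent.isPrefixOf (p.drop i ++ ([] : List Char)) = false := by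
          intro i hi
          rw [List.append_nil]
          exact pv_nomatch_clean_nil p (hcl p (by simp)) i hi
        have := pv_scan_s pvSent p [] [] acc f hno (by simp; omega)
        rw [List.append_nil] at this
        rw [this]
        rcases Nat.exists_eq_add_of_le (show 1 ≤ f - p.length by omega) with ⟨k, hk⟩
        rw [hk, Nat.add_comm 1 k, pv_sgo_nil]
        simp
      | cons q rest' =>
        rw [pv_intercalate_cons pvSent p (q :: rest') (by simp)] at hf ⊢
        rw [List.append_assoc]
        have hlen : (p ++ (pvSent ++ pvSent.intercalate (q :: rest'))).length + 1 ≤ f := by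
          rw [← List.append_assoc]; exact hf
        rw [pv_scan_s pvSent p _ [] acc f
          (pv_nomatch_clean p _ (hcl p (by simp)))
          (by simp [pvSent] at hlen ⊢; omega)]
        rcases Nat.exists_eq_add_of_le (show 1 ≤ f - p.length by simp [pvSent] at hlen; omega) with ⟨k, hk⟩
        rw [hk, Nat.add_comm 1 k]
        have hshape : pvSent ++ pvSent.intercalate (q :: rest')
            = '~' :: (['P','A','R','T','B','R','~'] ++ pvSent.intercalate (q :: rest')) := rfl
        rw [hshape, pv_sgo_cons, if_pos (by
          rw [← hshape]
          exact List.isPrefixOf_iff_prefix.mpr (List.prefix_append _ _)), ← hshape]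
        have hdrop : List.drop pvSent.length (pvSent ++ pvSent.intercalate (q :: rest'))
            = pvSent.intercalate (q :: rest') := List.drop_left
        rw [hdrop]
        have hk2 : (pvSent.intercalate (q :: rest')).length + 1 ≤ k := by
          have h8 : pvSent.length = 8 := rfl
          simp only [List.length_append, h8] at hlen
          omega
        simp only [List.append_nil, List.reverse_reverse]
        rw [ih (by simp) (fun p hp => hcl p (by simp [hp])) k (p :: acc) hk2]
        simp
  rw [PySem.Chars.splitOn]
  rw [hgo parts hne hcl _ [] (by omega)]
  simp

theorem pv_pieces_infix (p sep q : List Char) (h : q ∈ PySem.Chars.splitOn p sep) : q <:+: p := by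
  have hgo : ∀ (f : Nat) (l cur : List Char) (acc : List (List Char)),
      (∃ n, cur.reverse ++ l = p.drop n) → (∀ r ∈ acc, r <:+: p) →
      ∀ r ∈ PySem.Chars.splitOn.go sep f l cur acc, r <:+: p := by
    intro f
    induction f with
    | zero =>
      intro l cur acc hsuf hacc r hr
      rw [pv_sgo_zero] at hr
      simp only [List.mem_reverse, List.mem_cons] at hr
      rcases hr with hr | hr
      · obtain ⟨n, hn⟩ := hsuf
        rw [hr, hn]
        exact (List.drop_suffix n p).isInfix
      · exact hacc r hr
    | succ f ih =>
      intro l cur acc hsuf hacc r hr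
      cases l with
      | nil =>
        rw [pv_sgo_nil] at hr
        simp only [List.mem_reverse, List.mem_cons] at hr
        rcases hr with hr | hr
        · obtain ⟨n, hn⟩ := hsuf
          rw [List.append_nil] at hn
          rw [hr, hn]
          exact (List.drop_suffix n p).isInfix
        · exact hacc r hr
      | cons c t =>
        rw [pv_sgo_cons] at hr
        obtain ⟨n, hn⟩ := hsuf
        by_cases hp : sep.isPrefixOf (c :: t) = true
        · rw [if_pos hp] at hr
          refine ih _ _ _ ⟨n + cur.reverse.length + sep.length, ?_⟩ ?_ r hr
          · rw [List.reverse_nil, List.nil_append, ← List.drop_drop, ← List.drop_drop, ← hn]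
            rw [List.drop_left]
          · intro x hx
            rcases List.mem_cons.mp hx with hx | hx
            · subst hx
              have hpref : cur.reverse <+: p.drop n := by
                rw [← hn]; exact List.prefix_append _ _
              exact hpref.isInfix.trans (List.drop_suffix n p).isInfix
            · exact hacc x hx
        · rw [if_neg hp] at hr
          refine ih _ _ _ ⟨n, ?_⟩ hacc r hr
          rw [← hn]; simp
  rw [PySem.Chars.splitOn] at h
  exact hgo _ _ _ _ ⟨0, by simp⟩ (by simp) q h

theorem pv_main (seps : List (List Char)) (hs : ∀ sep ∈ seps, pvSepOK sep)
    (parts : List (List Char)) (hne : parts ≠ []) (hcl : ∀ p ∈ parts, ¬ pvH7 <:+: p) :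
    PySem.Chars.splitOn
        (seps.foldl (fun t sep => PySem.Chars.replace t sep pvSent) (pvSent.intercalate parts))
        pvSent
      = seps.foldl (fun ps sep => ps.flatMap (fun p => PySem.Chars.splitOn p sep)) parts := by
  induction seps generalizing parts with
  | nil => exact pv_split_intercalate parts hne hcl
  | cons sep seps' ih =>
    simp only [List.foldl_cons]
    rw [pv_replace_intercalate sep (hs sep (by simp)) parts hne]
    refine ih (fun s hsx => hs s (by simp [hsx])) _ ?_ ?_
    · obtain ⟨p, rest, rfl⟩ := List.exists_cons_of_ne_nil hne
      simp only [List.flatMap_cons]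
      intro hx
      rcases List.append_eq_nil_iff.mp hx with ⟨h3, _⟩
      exact pv_splitOn_ne_nil p sep h3
    · intro q hq
      rw [List.mem_flatMap] at hq
      obtain ⟨p, hp, hqp⟩ := hq
      intro hinf
      exact hcl p hp (hinf.trans (pv_pieces_infix p sep q hqp))

theorem pv_strip_infix (s : List Char) : PySem.Chars.strip s <:+: s := by
  rw [PySem.Chars.strip]
  have h1 : PySem.Chars.rstrip (PySem.Chars.lstrip s) <+: PySem.Chars.lstrip s := by
    rw [PySem.Chars.rstrip]
    have := List.dropWhile_suffix (l := (PySem.Chars.lstrip s).reverse) (p := PySem.Chars.isspace)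
    rw [← List.reverse_prefix] at this
    simpa using this
  have h2 : PySem.Chars.lstrip s <:+ s := List.dropWhile_suffix _
  exact h1.isInfix.trans h2.isInfix

-- the head of a nonempty lstrip/strip is not whitespace
theorem pv_lstrip_head (s : List Char) (h : PySem.Chars.lstrip s ≠ []) :
    PySem.Chars.isspace ((PySem.Chars.lstrip s).head h) = false :=
  List.head_dropWhile_not _ _

theorem pv_lstrip_of_head (l : List Char) (h : ∀ hne : l ≠ [], PySem.Chars.isspace (l.head hne) = false) :
    PySem.Chars.lstrip l = l := by
  cases l with
  | nil => rfl
  | cons c t =>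
    have hc := h (by simp)
    simp only [List.head_cons] at hc
    show List.dropWhile PySem.Chars.isspace (c :: t) = c :: t
    rw [List.dropWhile_cons_of_neg (by simp [hc])]

theorem pv_strip_strip (s : List Char) : PySem.Chars.strip (PySem.Chars.strip s) = PySem.Chars.strip s := by
  rw [PySem.Chars.strip, PySem.Chars.strip]
  have hls : PySem.Chars.lstrip (PySem.Chars.rstrip (PySem.Chars.lstrip s))
      = PySem.Chars.rstrip (PySem.Chars.lstrip s) := by
    apply pv_lstrip_of_head
    intro hne
    have hpre : PySem.Chars.rstrip (PySem.Chars.lstrip s) <+: PySem.Chars.lstrip s := by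
      rw [PySem.Chars.rstrip]
      have := List.dropWhile_suffix (l := (PySem.Chars.lstrip s).reverse) (p := PySem.Chars.isspace)
      rw [← List.reverse_prefix] at this
      simpa using this
    have hlne : PySem.Chars.lstrip s ≠ [] := by
      intro hx
      exact hne (by rw [hx]; simp [PySem.Chars.rstrip])
    have hhead : (PySem.Chars.rstrip (PySem.Chars.lstrip s)).head hne
        = (PySem.Chars.lstrip s).head hlne := (List.IsPrefix.head hpre hne).symm ▸ rfl
    rw [hhead]
    exact pv_lstrip_head s hlne
  rw [hls, PySem.Chars.rstrip, PySem.Chars.rstrip, List.reverse_reverse,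
    List.dropWhile_idempotent]

theorem pv_words_spec (s w : List Char) (h : w ∈ PySem.Chars.split₀ s) :
    (w <:+: s) ∧ w ≠ [] ∧ ∀ c ∈ w, PySem.Chars.isspace c = false := by
  have hgo : ∀ (l cur : List Char) (acc : List (List Char)),
      (∃ n, cur.reverse ++ l = s.drop n) → (∀ c ∈ cur, PySem.Chars.isspace c = false) →
      (∀ r ∈ acc, (r <:+: s) ∧ r ≠ [] ∧ ∀ c ∈ r, PySem.Chars.isspace c = false) →
      ∀ r ∈ PySem.Chars.split₀.go l cur acc,
        (r <:+: s) ∧ r ≠ [] ∧ ∀ c ∈ r, PySem.Chars.isspace c = false := by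
    intro l
    induction l with
    | nil =>
      intro cur acc hsuf hcur hacc r hr
      rw [PySem.Chars.split₀.go] at hr
      obtain ⟨n, hn⟩ := hsuf
      rw [List.append_nil] at hn
      by_cases hc : cur.isEmpty = true
      · rw [if_pos hc] at hr
        exact hacc r (by simpa using hr)
      · rw [if_neg hc] at hr
        simp only [List.mem_reverse, List.mem_cons] at hr
        rcases hr with hr | hr
        · subst hr
          refine ⟨hn ▸ (List.drop_suffix n s).isInfix, by simpa using hc, by simpa using hcur⟩
        · exact hacc r hr
    | cons c t ih =>
      intro cur acc hsuf hcur hacc r hr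
      rw [PySem.Chars.split₀.go] at hr
      obtain ⟨n, hn⟩ := hsuf
      by_cases hsp : PySem.Chars.isspace c = true
      · rw [if_pos hsp] at hr
        have hsuf' : ∃ m, ([] : List Char).reverse ++ t = s.drop m :=
          ⟨n + cur.reverse.length + 1, by
            rw [List.reverse_nil, List.nil_append, ← List.drop_drop, ← List.drop_drop, ← hn]
            rw [show cur.reverse.length = cur.reverse.length + 0 by rfl]
            simp [List.drop_left']⟩
        by_cases hc : cur.isEmpty = true
        · rw [if_pos hc] at hr
          exact ih [] acc hsuf' (by simp) hacc r hr
        · rw [if_neg hc] at hr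
          refine ih [] _ hsuf' (by simp) ?_ r hr
          intro x hx
          rcases List.mem_cons.mp hx with hx | hx
          · subst hx
            have hpref : cur.reverse <+: s.drop n := by rw [← hn]; exact List.prefix_append _ _
            exact ⟨hpref.isInfix.trans (List.drop_suffix n s).isInfix,
              by simpa using hc, by simpa using hcur⟩
          · exact hacc x hx
      · rw [if_neg hsp] at hr
        refine ih (c :: cur) acc ⟨n, by rw [← hn]; simp⟩ ?_ hacc r hr
        intro x hx
        rcases List.mem_cons.mp hx with hx | hx
        · subst hx; simpa using hsp
        · exact hcur x hx
  rw [PySem.Chars.split₀] at h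
  exact hgo s [] [] ⟨0, by simp⟩ (by simp) (by simp) w h

theorem pv_split₀_ne_nil (s : List Char) (h : PySem.Chars.strip s ≠ []) : PySem.Chars.split₀ s ≠ [] := by
  -- there is a non-space character in s
  have hex : ∃ c ∈ s, PySem.Chars.isspace c = false := by
    have hlne : PySem.Chars.lstrip s ≠ [] := by
      intro hx
      exact h (by rw [PySem.Chars.strip, hx]; simp [PySem.Chars.rstrip])
    refine ⟨(PySem.Chars.lstrip s).head hlne, ?_, pv_lstrip_head s hlne⟩
    exact (List.dropWhile_suffix _).subset (List.head_mem hlne)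
  have hgo : ∀ (l cur : List Char) (acc : List (List Char)),
      ((∃ c ∈ l, PySem.Chars.isspace c = false) ∨ cur ≠ [] ∨ acc ≠ []) →
      PySem.Chars.split₀.go l cur acc ≠ [] := by
    intro l
    induction l with
    | nil =>
      intro cur acc hd
      rw [PySem.Chars.split₀.go]
      rcases hd with hd | hd | hd
      · simp at hd
      · rw [if_neg (by simpa using hd)]; simp
      · split_ifs <;> simp [hd]
    | cons c t ih =>
      intro cur acc hd
      rw [PySem.Chars.split₀.go]
      by_cases hsp : PySem.Chars.isspace c = true
      · rw [if_pos hsp]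
        by_cases hc : cur.isEmpty = true
        · rw [if_pos hc]
          apply ih
          rcases hd with hd | hd | hd
          · obtain ⟨x, hx, hxs⟩ := hd
            rcases List.mem_cons.mp hx with rfl | hx
            · simp_all
            · exact Or.inl ⟨x, hx, hxs⟩
          · simp_all [List.isEmpty_iff]
          · exact Or.inr (Or.inr hd)
        · rw [if_neg hc]
          exact ih _ _ (Or.inr (Or.inr (by simp)))
      · rw [if_neg hsp]
        exact ih _ _ (Or.inr (Or.inl (by simp)))
  rw [PySem.Chars.split₀]
  exact hgo s [] [] (Or.inl hex)

theorem pv_infix_single (p u v : List Char) (c : Char) (h : p <:+: u ++ c :: v) (hc : c ∉ p) :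
    p <:+: u ∨ p <:+: v := by
  obtain ⟨x, y, hxy⟩ := h
  by_cases h1 : x.length + p.length ≤ u.length
  · left
    have htake : u.take ((x ++ p).length) = x ++ p := by
      have h3 := congrArg (List.take ((x ++ p).length)) hxy
      rw [List.take_left, List.take_append_of_le_length (by simpa using h1)] at h3
      exact h3.symm
    have hu := List.take_append_drop ((x ++ p).length) u
    rw [htake] at hu
    exact ⟨x, u.drop ((x ++ p).length), by rw [← hu]; simp⟩
  · by_cases h2 : u.length + 1 ≤ x.length
    · right
      have h3 := congrArg (List.drop x.length) hxy
      rw [List.append_assoc, List.drop_left] at h3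
      rw [show x.length = u.length + (x.length - u.length) from by omega,
        List.drop_length_add_append,
        show x.length - u.length = (x.length - u.length - 1) + 1 from by omega,
        List.drop_succ_cons] at h3
      have hp : p <+: v.drop (x.length - u.length - 1) := ⟨y, h3⟩
      exact hp.isInfix.trans (List.drop_suffix _ _).isInfix
    · exfalso
      apply hc
      have h3 := congrArg (List.drop u.length) hxy
      rw [List.drop_left, List.append_assoc,
        show u.length = x.length + (u.length - x.length) from by omega,
        List.drop_length_add_append,
        List.drop_append_of_le_length (by omega)] at h3
      have hm : u.length - x.length < p.length := by omega
      obtain ⟨d, r, hd⟩ : ∃ d r, p.drop (u.length - x.length) = d :: r := by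
        cases hw : p.drop (u.length - x.length) with
        | nil => exfalso; have := congrArg List.length hw; simp at this; omega
        | cons d r => exact ⟨d, r, rfl⟩
      rw [hd] at h3
      simp only [List.cons_append, List.cons.injEq] at h3
      have : d ∈ p := List.mem_of_mem_drop (hd ▸ List.mem_cons_self)
      rwa [h3.1] at this

theorem pv_join_clean (ws : List (List Char)) (hws : ∀ w ∈ ws, ¬ pvH7 <:+: w) :
    ¬ pvH7 <:+: PySem.Chars.join [' '] ws := by
  rw [PySem.Chars.join]
  induction ws with
  | nil =>
    intro hx
    have := hx.length_le
    simp [pvH7, List.intercalate] at this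
  | cons w rest ih =>
    cases rest with
    | nil =>
      have h1 : [' '].intercalate [w] = w := by simp [List.intercalate]
      rw [h1]
      exact hws w (by simp)
    | cons q rest' =>
      rw [pv_intercalate_cons [' '] w (q :: rest') (by simp)]
      intro hx
      rw [List.append_assoc, show ([' '] ++ [' '].intercalate (q :: rest'))
          = ' ' :: [' '].intercalate (q :: rest') from rfl] at hx
      rcases pv_infix_single pvH7 w _ ' ' hx (by simp [pvH7]) with h | h
      · exact hws w (by simp) h
      · exact ih (fun v hv => hws v (by simp [hv])) h

theorem pv_strip_of_nows (w : List Char) (h : ∀ c ∈ w, PySem.Chars.isspace c = false) :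
    PySem.Chars.strip w = w := by
  rw [PySem.Chars.strip]
  have hl : PySem.Chars.lstrip w = w := by
    apply pv_lstrip_of_head
    intro hne
    exact h _ (List.head_mem hne)
  rw [hl, PySem.Chars.rstrip]
  have hr : List.dropWhile PySem.Chars.isspace w.reverse = w.reverse := by
    cases hw : w.reverse with
    | nil => rfl
    | cons c t =>
      rw [List.dropWhile_cons_of_neg]
      simp only [Bool.not_eq_true]
      apply h
      have : c ∈ w.reverse := by rw [hw]; simp
      simpa using this
  rw [hr, List.reverse_reverse]

theorem pv_fold_classify (items cs ns : List String) :
    items.foldl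
        (fun (cn : List String × List String) item =>
          let item := PySem.Str.strip item
          if item = "" then cn
          else if PySem.Str.len item = 2 then (cn.1 ++ [item], cn.2)
          else (cn.1, cn.2 ++ [item])) (cs, ns)
      = (cs ++ ((items.map PySem.Str.strip).filter (fun t => t ≠ "")).filter (fun t => PySem.Str.len t = 2),
         ns ++ ((items.map PySem.Str.strip).filter (fun t => t ≠ "")).filter (fun t => ¬ (PySem.Str.len t = 2))) := by
  induction items generalizing cs ns with
  | nil => simp
  | cons it rest ih =>
    simp only [List.foldl_cons, List.map_cons, List.filter_cons]
    by_cases h0 : PySem.Str.strip it = ""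
    · show (List.foldl _ (if PySem.Str.strip it = "" then (cs, ns) else _) rest) = _
      rw [if_pos h0, if_neg (by simp [h0]), ih]
    · show (List.foldl _ (if PySem.Str.strip it = "" then (cs, ns)
          else if PySem.Str.len (PySem.Str.strip it) = 2
            then (cs ++ [PySem.Str.strip it], ns) else (cs, ns ++ [PySem.Str.strip it])) rest) = _
      have hd0 : decide (PySem.Str.strip it ≠ "") = true := by simp [h0]
      rw [if_neg h0, if_pos hd0, List.filter_cons, List.filter_cons]
      by_cases h2 : PySem.Str.len (PySem.Str.strip it) = 2
      · have hd2 : decide (PySem.Str.len (PySem.Str.strip it) = 2) = true := decide_eq_true h2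
        have hd2' : decide (¬PySem.Str.len (PySem.Str.strip it) = 2) = false :=
          decide_eq_false (not_not_intro h2)
        have hneg : ¬((decide ¬PySem.Str.len (PySem.Str.strip it) = 2) = true) := by
          rw [hd2']; simp
        rw [if_pos h2, if_pos hd2, if_neg hneg, ih]
        simp only [List.append_assoc, List.singleton_append]
      · have hd2 : decide (PySem.Str.len (PySem.Str.strip it) = 2) = false := decide_eq_false h2
        have hd2' : decide (¬PySem.Str.len (PySem.Str.strip it) = 2) = true := decide_eq_true h2
        have hneg : ¬((decide (PySem.Str.len (PySem.Str.strip it) = 2)) = true) := by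
          rw [hd2]; simp
        rw [if_neg h2, if_neg hneg, if_pos hd2', ih]
        simp only [List.append_assoc, List.singleton_append]

theorem pv_fold_classify₀ (items : List String) :
    items.foldl
        (fun (cn : List String × List String) item =>
          let item := PySem.Str.strip item
          if item = "" then cn
          else if PySem.Str.len item = 2 then (cn.1 ++ [item], cn.2)
          else (cn.1, cn.2 ++ [item])) ([], [])
      = (((items.map PySem.Str.strip).filter (fun t => t ≠ "")).filter (fun t => PySem.Str.len t = 2),
         ((items.map PySem.Str.strip).filter (fun t => t ≠ "")).filter (fun t => ¬ (PySem.Str.len t = 2))) := by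
  rw [pv_fold_classify]
  simp only [List.nil_append]

-- ---- String-level plumbing ----

theorem pv_fold_replace_toList (seps : List String) (t : String) :
    (seps.foldl (fun t sep => PySem.Str.replace t sep "~PARTBR~") t).toList
      = (seps.map String.toList).foldl (fun t sep => PySem.Chars.replace t sep pvSent) t.toList := by
  induction seps generalizing t with
  | nil => rfl
  | cons sep rest ih =>
    simp only [List.foldl_cons, List.map_cons]
    rw [ih]
    congr 1
    show (String.ofList (PySem.Chars.replace t.toList sep.toList "~PARTBR~".toList)).toList = _
    rw [String.toList_ofList]
    rfl

theorem pv_fold_parts (seps : List String) (hs : ∀ s ∈ seps, s.toList ≠ []) (ps : List (List Char)) :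
    seps.foldl (fun ps sep => ps.flatMap (fun p => (PySem.Str.split? p sep).getD [])) (ps.map String.ofList)
      = ((seps.map String.toList).foldl (fun ps sep => ps.flatMap (fun p => PySem.Chars.splitOn p sep)) ps).map String.ofList := by
  induction seps generalizing ps with
  | nil => rfl
  | cons sep rest ih =>
    simp only [List.foldl_cons, List.map_cons]
    have hstep : (ps.map String.ofList).flatMap (fun p => (PySem.Str.split? p sep).getD [])
        = (ps.flatMap (fun p => PySem.Chars.splitOn p sep.toList)).map String.ofList := by
      rw [List.flatMap_map]
      have hin : ∀ p : List Char,
          (PySem.Str.split? (String.ofList p) sep).getD []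
            = (PySem.Chars.splitOn p sep.toList).map String.ofList := by
        intro p
        rw [PySem.Str.split?, PySem.Chars.split?, String.toList_ofList,
          if_neg (by simpa using hs sep (by simp))]
        rfl
      calc ps.flatMap ((fun p => (PySem.Str.split? p sep).getD []) ∘ String.ofList)
          = ps.flatMap (fun p => (PySem.Chars.splitOn p sep.toList).map String.ofList) := by
            exact List.flatMap_congr (fun p _ => hin p)
        _ = (ps.flatMap (fun p => PySem.Chars.splitOn p sep.toList)).map String.ofList := by
            rw [List.map_flatMap]
    rw [hstep, ih (fun s hsx => hs s (by simp [hsx]))]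

theorem pv_join_ne (ws : List (List Char)) (h1 : ws ≠ []) (h2 : ∀ w ∈ ws, w ≠ []) :
    PySem.Chars.join [' '] ws ≠ [] := by
  obtain ⟨w, rest, rfl⟩ := List.exists_cons_of_ne_nil h1
  rw [PySem.Chars.join]
  cases rest with
  | nil =>
    have : [' '].intercalate [w] = w := by simp [List.intercalate]
    rw [this]
    exact h2 w (by simp)
  | cons q rest' =>
    rw [pv_intercalate_cons [' '] w (q :: rest') (by simp)]
    intro hx
    rcases List.append_eq_nil_iff.mp hx with ⟨h3, _⟩
    rcases List.append_eq_nil_iff.mp h3 with ⟨h4, _⟩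
    exact h2 w (by simp) h4

theorem pv_res (text : String) (hne : text ≠ "")
    (hfix : PySem.Chars.strip text.toList = text.toList) :
    remove_extra_spaces text
      = String.ofList (PySem.Chars.join [' '] (PySem.Chars.split₀ text.toList)) := by
  rw [remove_extra_spaces]
  have hstrip : PySem.Str.strip text = text := by
    rw [PySem.Str.strip, hfix, String.ofList_toList]
  simp only [if_neg hne, hstrip]
  have hsplit : PySem.Str.split₀ text = (PySem.Chars.split₀ text.toList).map String.ofList := rfl
  rw [hsplit]
  have hkeep : ∀ w ∈ (PySem.Chars.split₀ text.toList).map String.ofList,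
      PySem.Str.strip w = w ∧ w ≠ "" := by
    intro w hw
    rw [List.mem_map] at hw
    obtain ⟨cw, hcw, rfl⟩ := hw
    obtain ⟨_, hwne, hnows⟩ := pv_words_spec text.toList cw hcw
    constructor
    · rw [PySem.Str.strip, String.toList_ofList, pv_strip_of_nows cw hnows]
    · intro hx
      exact hwne (by simpa using congrArg String.toList hx)
  have hfilter : ((PySem.Chars.split₀ text.toList).map String.ofList).filter
        (fun item => decide (PySem.Str.strip item ≠ ""))
      = (PySem.Chars.split₀ text.toList).map String.ofList := by
    apply List.filter_eq_self.mpr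
    intro w hw
    rcases hkeep w hw with ⟨h1, h2⟩
    simp [h1, h2]
  rw [hfilter]
  have hmap : ((PySem.Chars.split₀ text.toList).map String.ofList).map
        (fun item => PySem.Str.strip item)
      = (PySem.Chars.split₀ text.toList).map String.ofList := by
    apply List.map_congr_left ?_ |>.trans (List.map_id _)
    intro w hw
    exact (hkeep w hw).1
  rw [hmap]
  rw [PySem.Str.join]
  congr 1
  rw [List.map_map]
  have : String.toList ∘ String.ofList = (id : List Char → List Char) :=
    funext (fun l => String.toList_ofList)
  rw [this, List.map_id]
  rfl

-- ===== VERDICT (by name: the statement is the Claim_ definition above) =====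
theorem standardize_code_and_name_spec : Claim_equal_standardize_code_and_name := by
  intro original hdom hpre
  show standardize_code_and_name original = standardize_code_and_name_alt original
  simp only [standardize_code_and_name, standardize_code_and_name_alt]
  by_cases h1 : (if original = "" then original else PySem.Str.strip original) = ""
  · rw [if_pos h1, if_pos h1]
  · rw [if_neg h1, if_neg h1]
    set T1 := if original = "" then original else PySem.Str.strip original with hT1def
    have horig : original ≠ "" := by
      intro hx
      apply h1
      rw [hT1def, if_pos hx]
      exact hx
    have hT1 : T1 = PySem.Str.strip original := by rw [hT1def, if_neg horig]
    have hT1chars : T1.toList = PySem.Chars.strip original.toList := by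
      rw [hT1, PySem.Str.strip, String.toList_ofList]
    have hfix : PySem.Chars.strip T1.toList = T1.toList := by
      rw [hT1chars]
      exact pv_strip_strip _
    have hT1ne : T1.toList ≠ [] := by
      intro hx
      exact h1 (String.toList_eq_nil_iff.mp hx)
    have hwne : PySem.Chars.split₀ T1.toList ≠ [] :=
      pv_split₀_ne_nil _ (by rw [hfix]; exact hT1ne)
    have hT2 : remove_extra_spaces T1
        = String.ofList (PySem.Chars.join [' '] (PySem.Chars.split₀ T1.toList)) :=
      pv_res T1 h1 hfix
    have hT2chars : (remove_extra_spaces T1).toList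
        = PySem.Chars.join [' '] (PySem.Chars.split₀ T1.toList) := by
      rw [hT2, String.toList_ofList]
    have hT2ne' : PySem.Chars.join [' '] (PySem.Chars.split₀ T1.toList) ≠ [] :=
      pv_join_ne _ hwne (fun w hw => (pv_words_spec _ w hw).2.1)
    have hT2ne : remove_extra_spaces T1 ≠ "" := by
      intro hx
      apply hT2ne'
      rw [← hT2chars, hx]
      rfl
    rw [if_neg hT2ne]
    -- the tokenisation agrees
    have hclean : ¬ pvH7 <:+: (remove_extra_spaces T1).toList := by
      rw [hT2chars]
      apply pv_join_clean
      intro w hw hinf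
      have hw1 := (pv_words_spec _ w hw).1
      have hpre' : ¬ pvH7 <:+: original.toList := by
        have := PySem.Chars.isIn_eq_false_iff "~PARTBR".toList original.toList
        exact this.mp hpre
      exact hpre' (hinf.trans (hw1.trans (hT1chars ▸ pv_strip_infix original.toList)))
    have hsne : ∀ s ∈ ITEMS_SEP_FOR_LOCATION ++ PARTS_SEP_FOR_LOCATION, s.toList ≠ [] := by decide
    have hlist : (ITEMS_SEP_FOR_LOCATION ++ PARTS_SEP_FOR_LOCATION).map String.toList
        = [[';'], [',', ' '], ['|'], ['/'], [' ', '-', ' '], ['-', ' '], [' ', '-'],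
           [',', ' '], ['('], ['/']] := rfl
    have hsok : ∀ sep ∈ (ITEMS_SEP_FOR_LOCATION ++ PARTS_SEP_FOR_LOCATION).map String.toList,
        pvSepOK sep := by
      rw [hlist]
      intro sep hsep
      fin_cases hsep <;> exact ⟨by decide, by simp⟩
    have hpieces :
        (PySem.Str.split?
            (PARTS_SEP_FOR_LOCATION.foldl (fun t sep => PySem.Str.replace t sep "~PARTBR~")
              (ITEMS_SEP_FOR_LOCATION.foldl (fun t sep => PySem.Str.replace t sep "~PARTBR~")
                (remove_extra_spaces T1)))
            "~PARTBR~").getD []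
        = (ITEMS_SEP_FOR_LOCATION ++ PARTS_SEP_FOR_LOCATION).foldl
            (fun ps sep => ps.flatMap (fun p => (PySem.Str.split? p sep).getD []))
            [remove_extra_spaces T1] := by
      rw [← List.foldl_append]
      rw [PySem.Str.split?, PySem.Chars.split?, if_neg (by decide)]
      simp only [Option.map_some, Option.getD_some]
      rw [show "~PARTBR~".toList = pvSent from rfl]
      have hA : (((ITEMS_SEP_FOR_LOCATION ++ PARTS_SEP_FOR_LOCATION).foldl
            (fun t sep => PySem.Str.replace t sep "~PARTBR~") (remove_extra_spaces T1))).toList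
          = ((ITEMS_SEP_FOR_LOCATION ++ PARTS_SEP_FOR_LOCATION).map String.toList).foldl
            (fun t sep => PySem.Chars.replace t sep pvSent) (remove_extra_spaces T1).toList :=
        pv_fold_replace_toList _ _
      have hic : pvSent.intercalate [(remove_extra_spaces T1).toList]
          = (remove_extra_spaces T1).toList := by simp [List.intercalate]
      have hmain := pv_main ((ITEMS_SEP_FOR_LOCATION ++ PARTS_SEP_FOR_LOCATION).map String.toList)
        hsok [(remove_extra_spaces T1).toList] (by simp)
        (by intro p hp; rw [List.mem_singleton] at hp; rw [hp]; exact hclean)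
      rw [hic] at hmain
      have hB : [remove_extra_spaces T1] = ([(remove_extra_spaces T1).toList]).map String.ofList := by
        simp [String.ofList_toList]
      rw [hB, pv_fold_parts _ hsne _, hA, hmain]
    rw [hpieces, pv_fold_classify₀]
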